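-- pv_equiv track=rewrite | github.com/envomp/2018-Introduction-to-Programming | xp06_maze/maze.py | maze_list
-- ===== SOURCE A (Python) =====
-- def maze_list(maze_str: str) -> list:
--     """Make maze list from maze string."""
--     out = []
--     row = []
--     for col in maze_str:
--         if col != '\n':
--             row.append(col)
--         elif len(row):
--             out.append(row)
--             row = []
--     return out
-- ===== SOURCE B (Python) =====
-- def maze_list(maze_str: str) -> list:
--     """Make maze list from maze string."""
--     rows = maze_str.split('\n')
--     return [list(r) for r in rows[:-1] if r]
-- ===== Notes on version B (the rewrite author's own statement) =====
-- stated objective: simpler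
-- what changed: Replaces the char-by-char loop with a flush-on-newline row buffer by one split on the newline character, dropping the unterminated last segment with [:-1] and keeping only non-empty rows in a single comprehension.
import Mathlib
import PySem

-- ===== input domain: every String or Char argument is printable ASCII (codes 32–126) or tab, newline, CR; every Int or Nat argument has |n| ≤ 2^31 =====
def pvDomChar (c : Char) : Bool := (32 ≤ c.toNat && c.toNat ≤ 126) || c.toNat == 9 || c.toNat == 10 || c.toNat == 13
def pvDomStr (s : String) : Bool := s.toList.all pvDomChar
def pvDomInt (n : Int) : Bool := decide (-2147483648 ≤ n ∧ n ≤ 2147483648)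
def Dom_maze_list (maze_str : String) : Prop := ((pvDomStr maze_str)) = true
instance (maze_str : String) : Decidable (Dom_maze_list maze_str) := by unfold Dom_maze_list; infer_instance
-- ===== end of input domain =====

-- B replaces A's char-by-char flush-on-newline buffer with split('\n'), drop the last segment, keep non-empty rows (objective: simpler).

-- ===== PORT A =====
-- char loop with (out, row) accumulator, flushing row on '\n' when non-empty
def maze_list (maze_str : String) : List (List String) :=
  (maze_str.toList.foldl
    (fun (st : List (List String) × List String) col =>
      if col ≠ '\n' then (st.1, st.2 ++ [col.toString])
      else if st.2.length ≠ 0 then (st.1 ++ [st.2], [])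
      else st)
    ([], [])).1

-- ===== PORT B =====
def maze_list_alt (maze_str : String) : List (List String) :=
  let rows := PySem.Chars.splitOn maze_str.toList ['\n']
  ((PySem.List.slice rows none (some (-1))).filter (fun r => r ≠ [])).map
    (fun r => r.map Char.toString)

-- ===== PRECONDITION & SPEC =====
def Spec_maze_list (maze_str : String) (out : List (List String)) : Prop := out = maze_list_alt maze_str
instance (maze_str : String) (out : List (List String)) : Decidable (Spec_maze_list maze_str out) := by unfold Spec_maze_list; infer_instance

-- ===== CLAIM (what is proved, stated in full; the proofs are below) =====
def Claim_equal_maze_list : Prop := ∀ (maze_str : String), Dom_maze_list maze_str → Spec_maze_list maze_str (maze_list maze_str)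

-- ===== LEMMAS AND PROOFS =====

-- spec function for splitting on '\n'
def pvSplitNL : List Char → List (List Char)
  | [] => [[]]
  | c :: cs =>
      if c = '\n' then [] :: pvSplitNL cs
      else (c :: (pvSplitNL cs).headI) :: (pvSplitNL cs).tail

theorem pvSplitNL_ne_nil (cs : List Char) : pvSplitNL cs ≠ [] := by
  cases cs with
  | nil => simp [pvSplitNL]
  | cons c cs => simp only [pvSplitNL]; split <;> simp

theorem pvSplitNL_cons_headI_tail (cs : List Char) :
    (pvSplitNL cs).headI :: (pvSplitNL cs).tail = pvSplitNL cs := by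
  cases h : pvSplitNL cs with
  | nil => exact absurd h (pvSplitNL_ne_nil cs)
  | cons a l => simp

theorem splitOn_go_spec (fuel : Nat) :
    ∀ (cs cur : List Char) (accs : List (List Char)), cs.length < fuel →
    PySem.Chars.splitOn.go ['\n'] fuel cs cur accs =
      accs.reverse ++ (cur.reverse ++ (pvSplitNL cs).headI) :: (pvSplitNL cs).tail := by
  induction fuel with
  | zero => intro cs cur accs h; omega
  | succ f ih =>
    intro cs cur accs h
    cases cs with
    | nil =>
      rw [PySem.Chars.splitOn.go] <;> simp [pvSplitNL]
    | cons c rest =>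
      rw [PySem.Chars.splitOn.go]
      simp only [List.isPrefixOf, List.isPrefixOf_nil_left, Bool.and_true, List.length_cons,
        List.drop_succ_cons, List.drop_zero]
      by_cases hc : c = '\n'
      · subst hc
        simp only [beq_self_eq_true, Bool.true_and, if_pos]
        simp only [List.length_nil, List.drop_zero]
        rw [ih rest [] (cur.reverse :: accs) (by simp at h; omega)]
        simp [pvSplitNL, pvSplitNL_cons_headI_tail]
      · rw [if_neg (by simp; exact fun h => hc h.symm)]
        rw [ih rest (c :: cur) accs (by simp at h; omega)]
        simp [pvSplitNL, hc]

theorem splitOn_eq_pvSplitNL (cs : List Char) :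
    PySem.Chars.splitOn cs ['\n'] = pvSplitNL cs := by
  unfold PySem.Chars.splitOn
  rw [splitOn_go_spec (cs.length + 1) cs [] [] (by omega)]
  simp [pvSplitNL_cons_headI_tail]

theorem foldA_spec (cs : List Char) :
    ∀ (out : List (List String)) (r : List Char),
    (cs.foldl
      (fun (st : List (List String) × List String) col =>
        if col ≠ '\n' then (st.1, st.2 ++ [col.toString])
        else if st.2.length ≠ 0 then (st.1 ++ [st.2], [])
        else st)
      (out, r.map Char.toString)).1 =
    out ++ ((((r ++ (pvSplitNL cs).headI) :: (pvSplitNL cs).tail).dropLast).filter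
            (fun x => x ≠ [])).map (List.map Char.toString) := by
  induction cs with
  | nil => intro out r; simp [pvSplitNL]
  | cons c cs ih =>
    intro out r
    by_cases hc : c = '\n'
    · subst hc
      simp only [List.foldl_cons, ne_eq, not_true_eq_false, if_false, if_neg (by simp : ¬('\n' ≠ '\n')),
        List.length_map, pvSplitNL, if_pos rfl, List.headI_cons, List.tail_cons]
      by_cases hr : r = []
      · subst hr
        simp only [List.length_nil, ne_eq, not_true_eq_false, if_false, List.map_nil]
        have h := ih out []
        simp only [List.map_nil, List.nil_append] at h
        rw [h, pvSplitNL_cons_headI_tail]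
        rw [← pvSplitNL_cons_headI_tail cs]
        cases htl : (pvSplitNL cs).tail with
        | nil => simp
        | cons a l => simp [List.filter]
      · rw [if_pos (by simpa [List.length_eq_zero_iff] using hr)]
        have h := ih (out ++ [r.map Char.toString]) []
        simp only [List.map_nil, List.nil_append] at h
        rw [h, pvSplitNL_cons_headI_tail]
        rw [← pvSplitNL_cons_headI_tail cs]
        cases htl : (pvSplitNL cs).tail with
        | nil => simp [List.filter, hr]
        | cons a l => simp [List.filter, hr]
    · simp only [List.foldl_cons, ne_eq, hc, not_false_eq_true, if_pos, pvSplitNL, if_neg hc,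
        List.headI_cons, List.tail_cons]
      have h := ih out (r ++ [c])
      simp only [List.map_append, List.map_cons, List.map_nil] at h
      rw [h]
      simp

-- ===== VERDICT (by name: the statement is the Claim_ definition above) =====
theorem maze_list_spec : Claim_equal_maze_list := by
  intro s _
  show maze_list s = maze_list_alt s
  have h := foldA_spec s.toList [] []
  simp only [List.map_nil, List.nil_append] at h
  simp only [maze_list, maze_list_alt, h, splitOn_eq_pvSplitNL,
    PySem.List.slice_to_neg_one, pvSplitNL_cons_headI_tail]
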